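-- pv_equiv track=rewrite | github.com/sneha-desai/EnergyForGood | main.py | init_state_map
-- ===== SOURCE A (Python) =====
-- def init_state_map(a, b, c, d):
--     count = 0
--     mapping = {}
--     for i in range(a):
--         for j in range(b):
--             for k in range(c):
--                 for l in range(d):
--                     mapping[count] = [i, j, k, l]
--                     count += 1
--     return mapping
-- ===== SOURCE B (Python) =====
-- def init_state_map(a, b, c, d):
--     total = max(a, 0) * max(b, 0) * max(c, 0) * max(d, 0)
--     mapping = {}
--     for n in range(total):
--         q, l = divmod(n, d)
--         q, k = divmod(q, c)
--         i, j = divmod(q, b)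
--         mapping[n] = [i, j, k, l]
--     return mapping
-- ===== Notes on version B (the rewrite author's own statement) =====
-- stated objective: alternative
-- what changed: Replaces the four nested loops (with an external running counter) by a single loop over range(total) whose body recovers the four coordinates from the flat index via a divmod chain, with each dimension clamped to 0 so empty/negative dimensions yield the same empty dict.
import Mathlib
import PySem

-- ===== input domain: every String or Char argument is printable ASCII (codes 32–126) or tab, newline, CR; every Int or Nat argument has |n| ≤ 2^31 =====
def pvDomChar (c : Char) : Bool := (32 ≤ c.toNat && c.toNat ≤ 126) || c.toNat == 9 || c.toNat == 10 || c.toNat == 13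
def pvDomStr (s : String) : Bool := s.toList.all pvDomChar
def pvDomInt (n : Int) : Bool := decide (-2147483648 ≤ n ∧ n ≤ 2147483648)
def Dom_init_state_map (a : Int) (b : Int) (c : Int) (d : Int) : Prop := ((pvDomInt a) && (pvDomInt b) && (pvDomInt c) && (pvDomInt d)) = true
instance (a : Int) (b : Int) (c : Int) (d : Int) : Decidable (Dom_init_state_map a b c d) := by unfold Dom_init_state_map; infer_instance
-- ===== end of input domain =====

-- B replaces A's four nested loops by a single pass over range(total) that decodes each
-- flat index into its coordinates with divmod (same return value; alternative decomposition).

-- ===== PORT A =====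
def init_state_map (a : Int) (b : Int) (c : Int) (d : Int) : List (Int × List Int) :=
  -- count = 0; mapping = {}; four nested loops; mapping[count] = [i,j,k,l]; count += 1
  let s :=
    (PySem.List.pyRange 0 a 1).foldl (fun s i =>
      (PySem.List.pyRange 0 b 1).foldl (fun s j =>
        (PySem.List.pyRange 0 c 1).foldl (fun s k =>
          (PySem.List.pyRange 0 d 1).foldl (fun s l =>
            (s.1 + 1, s.2.insert s.1 [i, j, k, l])) s) s) s)
      ((0 : Int), (PySem.Dict.empty : PySem.Dict Int (List Int)))
  s.2.items

-- ===== PORT B =====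
def init_state_map_alt (a : Int) (b : Int) (c : Int) (d : Int) : List (Int × List Int) :=
  -- total = max(a,0)*max(b,0)*max(c,0)*max(d,0); one loop; q,l = divmod(n,d); q,k = divmod(q,c); i,j = divmod(q,b)
  let total := max a 0 * max b 0 * max c 0 * max d 0
  ((PySem.List.pyRange 0 total 1).foldl (fun m n =>
      let q1 := PySem.Int.floordiv n d
      let l := PySem.Int.mod n d
      let q2 := PySem.Int.floordiv q1 c
      let k := PySem.Int.mod q1 c
      let i := PySem.Int.floordiv q2 b
      let j := PySem.Int.mod q2 b
      m.insert n [i, j, k, l])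
    (PySem.Dict.empty : PySem.Dict Int (List Int))).items

-- ===== PRECONDITION & SPEC =====
def Spec_init_state_map (a : Int) (b : Int) (c : Int) (d : Int) (out : List (Int × List Int)) : Prop := out = init_state_map_alt a b c d
instance (a : Int) (b : Int) (c : Int) (d : Int) (out : List (Int × List Int)) : Decidable (Spec_init_state_map a b c d out) := by unfold Spec_init_state_map; infer_instance

-- ===== CLAIM (what is proved, stated in full; the proofs are below) =====
def Claim_equal_init_state_map : Prop := ∀ (a : Int) (b : Int) (c : Int) (d : Int), Dom_init_state_map a b c d → Spec_init_state_map a b c d (init_state_map a b c d)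

-- ===== LEMMAS AND PROOFS =====

-- the coordinate lists A's nested loops run through, in loop order
def pvCoords (a b c d : Int) : List (List Int) :=
  (PySem.List.pyRange 0 a 1).flatMap (fun i =>
    (PySem.List.pyRange 0 b 1).flatMap (fun j =>
      (PySem.List.pyRange 0 c 1).flatMap (fun k =>
        (PySem.List.pyRange 0 d 1).map (fun l => [i, j, k, l]))))

-- B's divmod decoding of a flat index, as one function
def pvDec (b c d n : Int) : List Int :=
  [PySem.Int.floordiv (PySem.Int.floordiv (PySem.Int.floordiv n d) c) b,
   PySem.Int.mod (PySem.Int.floordiv (PySem.Int.floordiv n d) c) b,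
   PySem.Int.mod (PySem.Int.floordiv n d) c,
   PySem.Int.mod n d]

-- A's nested loops are one fold of the count/insert step over pvCoords
lemma pvA_eq_coords (a b c d : Int) :
    init_state_map a b c d =
      ((pvCoords a b c d).foldl (fun s v => (s.1 + 1, s.2.insert s.1 v))
        ((0 : Int), (PySem.Dict.empty : PySem.Dict Int (List Int)))).2.items := by
  unfold init_state_map pvCoords
  simp only [List.foldl_flatMap, List.foldl_map]

-- B's body with the lets collapsed into pvDec
lemma pvB_eq (a b c d : Int) : init_state_map_alt a b c d =
    ((PySem.List.pyRange 0 (max a 0 * max b 0 * max c 0 * max d 0) 1).foldl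
      (fun m n => m.insert n (pvDec b c d n))
      (PySem.Dict.empty : PySem.Dict Int (List Int))).items := rfl

-- A's fold appends a fresh-keyed entry per coordinate list: its items are an enumeration
lemma pv_loop_items (L : List (List Int)) : ∀ (cnt : Int) (dict : PySem.Dict Int (List Int)),
    (∀ k ∈ dict.keys, k < cnt) →
    ((L.foldl (fun s v => (s.1 + 1, s.2.insert s.1 v)) (cnt, dict)).2).items
      = dict.items ++ PySem.List.enumerate L cnt := by
  induction L with
  | nil => intro cnt dict h; simp [PySem.List.enumerate_nil]
  | cons v L ih =>
    intro cnt dict h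
    have hc : dict.contains cnt = false := by
      rw [← Bool.not_eq_true]
      intro hco
      exact absurd (h cnt ((PySem.Dict.contains_iff_mem_keys dict cnt).mp hco)) (lt_irrefl cnt)
    have h' : ∀ k ∈ (dict.insert cnt v).keys, k < cnt + 1 := by
      intro k hk
      rcases (PySem.Dict.mem_keys_insert dict cnt k v).mp hk with rfl | hk
      · omega
      · exact lt_trans (h k hk) (by omega)
    simp only [List.foldl_cons]
    rw [ih (cnt + 1) (dict.insert cnt v) h',
      PySem.Dict.items_insert_of_not_contains dict v hc,
      PySem.List.enumerate_cons]
    simp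

-- enumerating a mapped range pairs each index with its image
lemma pv_enum_map (f : Int → List Int) : ∀ (n : Nat) (s : Int),
    PySem.List.enumerate ((PySem.List.pyRange s (s + n) 1).map f) s
      = (PySem.List.pyRange s (s + n) 1).map (fun x => (x, f x)) := by
  intro n
  induction n with
  | zero => intro s; simp [PySem.List.enumerate_nil]
  | succ n ih =>
    intro s
    have hlt : s < s + ((n : Nat) + 1 : Nat) := by push_cast; omega
    rw [PySem.List.pyRange_one_cons hlt]
    have he : s + (((n : Nat) + 1 : Nat) : Int) = (s + 1) + (n : Nat) := by push_cast; ring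
    simp only [List.map_cons, PySem.List.enumerate_cons]
    rw [he, ih (s + 1)]

-- splitting a flat range of length P*m into P blocks of length m
lemma pv_splitF_nat {α : Type} (m : Int) (hm : 0 < m) (F : Int → List α) : ∀ (n : Nat),
    (PySem.List.pyRange 0 ((n : Int) * m) 1).flatMap F
      = (PySem.List.pyRange 0 (n : Int) 1).flatMap (fun q =>
          (PySem.List.pyRange 0 m 1).flatMap (fun r => F (q * m + r))) := by
  intro n
  induction n with
  | zero => simp [PySem.List.pyRange_one_eq_nil (by omega : (0:Int) ≤ 0)]
  | succ n ih =>
    have h1 : (0:Int) ≤ (n : Int) * m := by positivity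
    have h2 : ((n : Int)) * m ≤ (((n:Nat)+1 : Nat) : Int) * m := by push_cast; nlinarith
    have he : ((((n:Nat)+1 : Nat)) : Int) = (n : Int) + 1 := by push_cast; ring
    rw [PySem.List.pyRange_one_append 0 ((n : Int) * m) (((((n:Nat)+1 : Nat)) : Int) * m) h1 h2,
      List.flatMap_append, ih, he,
      PySem.List.pyRange_one_succ_right (by positivity : (0:Int) ≤ (n:Int)),
      List.flatMap_append]
    congr 1
    rw [List.flatMap_singleton]
    rw [PySem.List.pyRange_one ((n : Int) * m) (((n : Int) + 1) * m),
        PySem.List.pyRange_one 0 m]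
    have hb : (((n : Int) + 1) * m - (n : Int) * m) = m := by ring
    rw [hb]
    simp [List.flatMap_map]

lemma pv_splitF {α : Type} (m P : Int) (hm : 0 < m) (hP : 0 ≤ P) (F : Int → List α) :
    (PySem.List.pyRange 0 (P * m) 1).flatMap F
      = (PySem.List.pyRange 0 P 1).flatMap (fun q =>
          (PySem.List.pyRange 0 m 1).flatMap (fun r => F (q * m + r))) := by
  have h : ((P.toNat : Int)) = P := Int.toNat_of_nonneg hP
  rw [← h]; exact pv_splitF_nat m hm F P.toNat

lemma pv_divmod (q m r : Int) (hm : 0 < m) (h0 : 0 ≤ r) (h : r < m) :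
    PySem.Int.floordiv (q * m + r) m = q ∧ PySem.Int.mod (q * m + r) m = r := by
  constructor
  · rw [PySem.Int.floordiv_eq_ediv_of_pos hm, add_comm,
      Int.add_mul_ediv_right r q hm.ne', Int.ediv_eq_zero_of_lt h0 h, zero_add]
  · rw [PySem.Int.mod_eq_emod_of_pos hm, add_comm, mul_comm q m, Int.add_mul_emod_self_left,
      Int.emod_eq_of_lt h0 h]

lemma pv_decode (b c d i j k l : Int) (hb : 0 < b) (hc : 0 < c) (hd : 0 < d)
    (hj0 : 0 ≤ j) (hj : j < b) (hk0 : 0 ≤ k) (hk : k < c) (hl0 : 0 ≤ l) (hl : l < d) :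
    pvDec b c d (((i * b + j) * c + k) * d + l) = [i, j, k, l] := by
  obtain ⟨hd1, hd2⟩ := pv_divmod ((i * b + j) * c + k) d l hd hl0 hl
  obtain ⟨hc1, hc2⟩ := pv_divmod (i * b + j) c k hc hk0 hk
  obtain ⟨hb1, hb2⟩ := pv_divmod i b j hb hj0 hj
  simp [pvDec, hd1, hd2, hc1, hc2, hb1, hb2]

lemma pv_coords_eq_map (a b c d : Int) (ha : 0 < a) (hb : 0 < b) (hc : 0 < c) (hd : 0 < d) :
    (PySem.List.pyRange 0 (a * b * c * d) 1).map (pvDec b c d) = pvCoords a b c d := by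
  rw [List.map_eq_flatMap]
  rw [pv_splitF d (a * b * c) hd (by positivity)]
  rw [pv_splitF c (a * b) hc (by positivity)]
  rw [pv_splitF b a hb (by positivity)]
  unfold pvCoords
  refine List.flatMap_congr fun i hi => ?_
  refine List.flatMap_congr fun j hj => ?_
  refine List.flatMap_congr fun k hk => ?_
  rw [List.map_eq_flatMap]
  refine List.flatMap_congr fun l hl => ?_
  rw [pv_decode b c d i j k l hb hc hd
    (PySem.List.mem_pyRange_one.mp hj).1 (PySem.List.mem_pyRange_one.mp hj).2
    (PySem.List.mem_pyRange_one.mp hk).1 (PySem.List.mem_pyRange_one.mp hk).2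
    (PySem.List.mem_pyRange_one.mp hl).1 (PySem.List.mem_pyRange_one.mp hl).2]

lemma pv_coords_nil (a b c d : Int) (h : a ≤ 0 ∨ b ≤ 0 ∨ c ≤ 0 ∨ d ≤ 0) :
    pvCoords a b c d = [] := by
  unfold pvCoords
  rw [List.flatMap_eq_nil_iff]; intro i hi
  rw [List.flatMap_eq_nil_iff]; intro j hj
  rw [List.flatMap_eq_nil_iff]; intro k hk
  rcases h with h | h | h | h
  · exact absurd (PySem.List.mem_pyRange_one.mp hi) (by omega)
  · exact absurd (PySem.List.mem_pyRange_one.mp hj) (by omega)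
  · exact absurd (PySem.List.mem_pyRange_one.mp hk) (by omega)
  · rw [PySem.List.pyRange_one_eq_nil h, List.map_nil]

-- ===== VERDICT (by name: the statement is the Claim_ definition above) =====
theorem init_state_map_spec : Claim_equal_init_state_map := by
  intro a b c d _
  unfold Spec_init_state_map
  rw [pvA_eq_coords, pv_loop_items _ 0 _ (by simp [PySem.Dict.keys_empty]), pvB_eq]
  by_cases hpos : 0 < a ∧ 0 < b ∧ 0 < c ∧ 0 < d
  · obtain ⟨ha, hb, hc, hd⟩ := hpos
    have hma : max a 0 = a := max_eq_left ha.le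
    have hmb : max b 0 = b := max_eq_left hb.le
    have hmc : max c 0 = c := max_eq_left hc.le
    have hmd : max d 0 = d := max_eq_left hd.le
    rw [hma, hmb, hmc, hmd]
    have hfold := PySem.Dict.items_foldl_insert_fresh
      (PySem.List.pyRange 0 (a * b * c * d) 1)
      (fun n : Int => n) (pvDec b c d)
      (PySem.Dict.empty : PySem.Dict Int (List Int))
      (by intro x hx; exact PySem.Dict.contains_empty x)
      (by simpa using PySem.List.nodup_pyRange_one 0 (a * b * c * d))
    simp only at hfold
    rw [hfold]
    rw [← pv_coords_eq_map a b c d ha hb hc hd]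
    have hT : (0 : Int) + (((a * b * c * d).toNat : Nat) : Int) = a * b * c * d := by
      rw [Int.toNat_of_nonneg (by positivity)]; ring
    rw [← hT, pv_enum_map (pvDec b c d) ((a * b * c * d).toNat) 0]
  · have h : a ≤ 0 ∨ b ≤ 0 ∨ c ≤ 0 ∨ d ≤ 0 := by
      rcases not_and_or.mp hpos with h | h
      · left; omega
      rcases not_and_or.mp h with h | h
      · right; left; omega
      rcases not_and_or.mp h with h | h
      · right; right; left; omega
      · right; right; right; omega
    have hT : max a 0 * max b 0 * max c 0 * max d 0 = 0 := by
      rcases h with h | h | h | h <;> simp [max_eq_right h]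
    rw [pv_coords_nil a b c d h, hT, PySem.List.pyRange_one_eq_nil (le_refl 0)]
    simp [PySem.List.enumerate_nil]
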